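-- pv_equiv track=rewrite | github.com/kc099/BatteryAnnotation | dataset_analyzer.py | analyze_quality_combinations
-- ===== SOURCE A (Python) =====
-- def analyze_quality_combinations(annotations):
--     """
--     Analyze combinations of quality issues across different components.
--     """
--     quality_fields = ['hole_quality', 'text_quality', 'knob_quality', 'surface_quality']
--
--     # Initialize counters for different combinations
--     combination_stats = {
--         'hole_knob': {'good': [], 'bad': []},
--         'knob_text': {'good': [], 'bad': []},
--         'text_surface': {'good': [], 'bad': []},
--         'hole_text': {'good': [], 'bad': []},
--         'hole_surface': {'good': [], 'bad': []},
--         'knob_surface': {'good': [], 'bad': []},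
--         'all_components': {'good': [], 'bad': []}
--     }
--
--     for ann in annotations:
--         image_name = ann.get('_image_name', 'unknown')
--
--         # Check if all quality fields exist
--         if all(field in ann for field in quality_fields):
--             hole_qual = ann['hole_quality'].upper()
--             text_qual = ann['text_quality'].upper()
--             knob_qual = ann['knob_quality'].upper()
--             surface_qual = ann['surface_quality'].upper()
--
--             # Helper function to classify quality
--             def is_good(quality):
--                 return quality in ['GOOD', 'EXCELLENT', 'PERFECT']
--
--             # Analyze combinations
--             hole_good = is_good(hole_qual)
--             text_good = is_good(text_qual)
--             knob_good = is_good(knob_qual)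
--             surface_good = is_good(surface_qual)
--
--             # Hole + Knob combination
--             if hole_good and knob_good:
--                 combination_stats['hole_knob']['good'].append(image_name)
--             else:
--                 combination_stats['hole_knob']['bad'].append(image_name)
--
--             # Knob + Text combination
--             if knob_good and text_good:
--                 combination_stats['knob_text']['good'].append(image_name)
--             else:
--                 combination_stats['knob_text']['bad'].append(image_name)
--
--             # Text + Surface combination
--             if text_good and surface_good:
--                 combination_stats['text_surface']['good'].append(image_name)
--             else:
--                 combination_stats['text_surface']['bad'].append(image_name)
--
--             # Hole + Text combination
--             if hole_good and text_good:
--                 combination_stats['hole_text']['good'].append(image_name)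
--             else:
--                 combination_stats['hole_text']['bad'].append(image_name)
--
--             # Hole + Surface combination
--             if hole_good and surface_good:
--                 combination_stats['hole_surface']['good'].append(image_name)
--             else:
--                 combination_stats['hole_surface']['bad'].append(image_name)
--
--             # Knob + Surface combination
--             if knob_good and surface_good:
--                 combination_stats['knob_surface']['good'].append(image_name)
--             else:
--                 combination_stats['knob_surface']['bad'].append(image_name)
--
--             # All components
--             if all([hole_good, text_good, knob_good, surface_good]):
--                 combination_stats['all_components']['good'].append(image_name)
--             else:
--                 combination_stats['all_components']['bad'].append(image_name)
--
--     return combination_stats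
-- ===== SOURCE B (Python) =====
-- GOOD = {'GOOD', 'EXCELLENT', 'PERFECT'}
-- FIELDS = ('hole_quality', 'text_quality', 'knob_quality', 'surface_quality')
--
--
-- def analyze_quality_combinations(annotations):
--     """Two-stage: first extract (name, flags) rows, then build each bucket by filtering."""
--     rows = [(ann.get('_image_name', 'unknown'),
--              ann['hole_quality'].upper() in GOOD,
--              ann['text_quality'].upper() in GOOD,
--              ann['knob_quality'].upper() in GOOD,
--              ann['surface_quality'].upper() in GOOD)
--             for ann in annotations if all(f in ann for f in FIELDS)]
--
--     def split(pred):
--         return {'good': [n for n, h, t, k, s in rows if pred(h, t, k, s)],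
--                 'bad':  [n for n, h, t, k, s in rows if not pred(h, t, k, s)]}
--
--     return {
--         'hole_knob':      split(lambda h, t, k, s: h and k),
--         'knob_text':      split(lambda h, t, k, s: k and t),
--         'text_surface':   split(lambda h, t, k, s: t and s),
--         'hole_text':      split(lambda h, t, k, s: h and t),
--         'hole_surface':   split(lambda h, t, k, s: h and s),
--         'knob_surface':   split(lambda h, t, k, s: k and s),
--         'all_components': split(lambda h, t, k, s: h and t and k and s),
--     }
-- ===== Notes on version B (the rewrite author's own statement) =====
-- stated objective: alternative
-- what changed: A interleaves classification and accumulation in one pass that appends into a pre-initialized stats dict via seven if/else blocks; B works in two stages: it first extracts a list of (name, four-boolean-flags) rows for the valid annotations, then builds each bucket directly by filtering that row list with a predicate per combination (no mutable stats, no appending).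
import Mathlib
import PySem

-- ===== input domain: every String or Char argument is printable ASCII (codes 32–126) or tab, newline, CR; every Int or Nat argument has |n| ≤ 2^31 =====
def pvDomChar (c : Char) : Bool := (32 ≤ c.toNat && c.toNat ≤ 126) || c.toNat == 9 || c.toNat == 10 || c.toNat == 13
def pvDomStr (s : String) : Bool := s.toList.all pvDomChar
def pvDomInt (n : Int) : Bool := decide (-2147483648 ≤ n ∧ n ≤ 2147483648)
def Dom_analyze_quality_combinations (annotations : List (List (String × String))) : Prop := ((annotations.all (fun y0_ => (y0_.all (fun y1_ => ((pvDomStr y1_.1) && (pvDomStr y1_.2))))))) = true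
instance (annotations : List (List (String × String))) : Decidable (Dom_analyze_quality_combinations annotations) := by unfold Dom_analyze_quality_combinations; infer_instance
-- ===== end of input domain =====

-- B replaces A's single pass with interleaved appends into mutable stats by a two-stage
-- build: extract (name, flags) rows, then construct each bucket by filtering; same cost.

-- ===== PORT A =====
-- nested dict mutation stats[key][gb].append(name): modify in place, preserving order
def pvAppendStat (stats : List (String × List (String × List String)))
    (key gb name : String) : List (String × List (String × List String)) :=
  stats.map (fun p =>
    if p.1 = key then
      (p.1, p.2.map (fun q => if q.1 = gb then (q.1, q.2 ++ [name]) else q))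
    else p)

def pvInitStats : List (String × List (String × List String)) :=
  [("hole_knob", [("good", []), ("bad", [])]),
   ("knob_text", [("good", []), ("bad", [])]),
   ("text_surface", [("good", []), ("bad", [])]),
   ("hole_text", [("good", []), ("bad", [])]),
   ("hole_surface", [("good", []), ("bad", [])]),
   ("knob_surface", [("good", []), ("bad", [])]),
   ("all_components", [("good", []), ("bad", [])])]

-- loop body of A (ann['f'] is read under the existence guard, so getD with "" is exact)
def pvStepA (stats : List (String × List (String × List String)))
    (ann : List (String × String)) : List (String × List (String × List String)) :=
  let d := PySem.Dict.mk ann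
  let image_name := PySem.Dict.getD d "_image_name" "unknown"
  if (["hole_quality", "text_quality", "knob_quality", "surface_quality"].all
        (fun f => PySem.Dict.contains d f)) then
    let hole_qual := PySem.Str.upper (PySem.Dict.getD d "hole_quality" "")
    let text_qual := PySem.Str.upper (PySem.Dict.getD d "text_quality" "")
    let knob_qual := PySem.Str.upper (PySem.Dict.getD d "knob_quality" "")
    let surface_qual := PySem.Str.upper (PySem.Dict.getD d "surface_quality" "")
    let hole_good := ["GOOD", "EXCELLENT", "PERFECT"].contains hole_qual
    let text_good := ["GOOD", "EXCELLENT", "PERFECT"].contains text_qual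
    let knob_good := ["GOOD", "EXCELLENT", "PERFECT"].contains knob_qual
    let surface_good := ["GOOD", "EXCELLENT", "PERFECT"].contains surface_qual
    let s1 := if hole_good && knob_good then pvAppendStat stats "hole_knob" "good" image_name
              else pvAppendStat stats "hole_knob" "bad" image_name
    let s2 := if knob_good && text_good then pvAppendStat s1 "knob_text" "good" image_name
              else pvAppendStat s1 "knob_text" "bad" image_name
    let s3 := if text_good && surface_good then pvAppendStat s2 "text_surface" "good" image_name
              else pvAppendStat s2 "text_surface" "bad" image_name
    let s4 := if hole_good && text_good then pvAppendStat s3 "hole_text" "good" image_name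
              else pvAppendStat s3 "hole_text" "bad" image_name
    let s5 := if hole_good && surface_good then pvAppendStat s4 "hole_surface" "good" image_name
              else pvAppendStat s4 "hole_surface" "bad" image_name
    let s6 := if knob_good && surface_good then pvAppendStat s5 "knob_surface" "good" image_name
              else pvAppendStat s5 "knob_surface" "bad" image_name
    let s7 := if [hole_good, text_good, knob_good, surface_good].all id then
                pvAppendStat s6 "all_components" "good" image_name
              else pvAppendStat s6 "all_components" "bad" image_name
    s7
  else stats

def analyze_quality_combinations (annotations : List (List (String × String))) :
    List (String × List (String × List String)) :=
  annotations.foldl pvStepA pvInitStats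

-- ===== PORT B =====
def pvGoodB (s : String) : Bool :=
  ["GOOD", "EXCELLENT", "PERFECT"].contains (PySem.Str.upper s)

-- stage 1 of Source B: the row-extraction comprehension
def pvRows (annotations : List (List (String × String))) :
    List (String × Bool × Bool × Bool × Bool) :=
  annotations.filterMap (fun ann =>
    let d := PySem.Dict.mk ann
    if (["hole_quality", "text_quality", "knob_quality", "surface_quality"].all
          (fun f => PySem.Dict.contains d f)) then
      some (PySem.Dict.getD d "_image_name" "unknown",
            pvGoodB (PySem.Dict.getD d "hole_quality" ""),
            pvGoodB (PySem.Dict.getD d "text_quality" ""),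
            pvGoodB (PySem.Dict.getD d "knob_quality" ""),
            pvGoodB (PySem.Dict.getD d "surface_quality" ""))
    else none)

-- Source B's split helper: one good/bad bucket built by filtering the rows
def pvSplit (rows : List (String × Bool × Bool × Bool × Bool))
    (pred : Bool → Bool → Bool → Bool → Bool) : List (String × List String) :=
  [("good", (rows.filter (fun r => pred r.2.1 r.2.2.1 r.2.2.2.1 r.2.2.2.2)).map (·.1)),
   ("bad", (rows.filter (fun r => !(pred r.2.1 r.2.2.1 r.2.2.2.1 r.2.2.2.2))).map (·.1))]

-- stage 2 of Source B: the returned dict literal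
def pvBuild (rows : List (String × Bool × Bool × Bool × Bool)) :
    List (String × List (String × List String)) :=
  [("hole_knob", pvSplit rows (fun h _ k _ => h && k)),
   ("knob_text", pvSplit rows (fun _ t k _ => k && t)),
   ("text_surface", pvSplit rows (fun _ t _ s => t && s)),
   ("hole_text", pvSplit rows (fun h t _ _ => h && t)),
   ("hole_surface", pvSplit rows (fun h _ _ s => h && s)),
   ("knob_surface", pvSplit rows (fun _ _ k s => k && s)),
   ("all_components", pvSplit rows (fun h t k s => h && t && k && s))]

def analyze_quality_combinations_alt (annotations : List (List (String × String))) :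
    List (String × List (String × List String)) :=
  pvBuild (pvRows annotations)

-- ===== PRECONDITION & SPEC =====
def Spec_analyze_quality_combinations (annotations : List (List (String × String))) (out : List (String × List (String × List String))) : Prop := out = analyze_quality_combinations_alt annotations
instance (annotations : List (List (String × String))) (out : List (String × List (String × List String))) : Decidable (Spec_analyze_quality_combinations annotations out) := by unfold Spec_analyze_quality_combinations; infer_instance

-- ===== CLAIM (what is proved, stated in full; the proofs are below) =====
def Claim_equal_analyze_quality_combinations : Prop := ∀ (annotations : List (List (String × String))), Dom_analyze_quality_combinations annotations → Spec_analyze_quality_combinations annotations (analyze_quality_combinations annotations)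

-- ===== LEMMAS AND PROOFS =====

theorem pvRows_single (ann : List (String × String)) :
    pvRows [ann] =
      (if (["hole_quality", "text_quality", "knob_quality", "surface_quality"].all
            (fun f => PySem.Dict.contains (PySem.Dict.mk ann) f)) then
        [(PySem.Dict.getD (PySem.Dict.mk ann) "_image_name" "unknown",
          pvGoodB (PySem.Dict.getD (PySem.Dict.mk ann) "hole_quality" ""),
          pvGoodB (PySem.Dict.getD (PySem.Dict.mk ann) "text_quality" ""),
          pvGoodB (PySem.Dict.getD (PySem.Dict.mk ann) "knob_quality" ""),
          pvGoodB (PySem.Dict.getD (PySem.Dict.mk ann) "surface_quality" ""))]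
      else []) := by
  by_cases hg : (["hole_quality", "text_quality", "knob_quality", "surface_quality"].all
      (fun f => PySem.Dict.contains (PySem.Dict.mk ann) f)) = true
  · simp only [pvRows, List.filterMap_cons, List.filterMap_nil, hg, if_true]
  · simp only [pvRows, List.filterMap_cons, List.filterMap_nil, hg, if_false, Bool.false_eq_true]

theorem pvStepA_build (rows : List (String × Bool × Bool × Bool × Bool))
    (ann : List (String × String)) :
    pvStepA (pvBuild rows) ann = pvBuild (rows ++ pvRows [ann]) := by
  rw [pvRows_single]
  by_cases hg : (["hole_quality", "text_quality", "knob_quality", "surface_quality"].all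
      (fun f => PySem.Dict.contains (PySem.Dict.mk ann) f)) = true
  · rw [if_pos hg]
    simp only [pvStepA]
    rw [if_pos hg]
    cases h1 : pvGoodB (PySem.Dict.getD (PySem.Dict.mk ann) "hole_quality" "") <;>
    cases h2 : pvGoodB (PySem.Dict.getD (PySem.Dict.mk ann) "text_quality" "") <;>
    cases h3 : pvGoodB (PySem.Dict.getD (PySem.Dict.mk ann) "knob_quality" "") <;>
    cases h4 : pvGoodB (PySem.Dict.getD (PySem.Dict.mk ann) "surface_quality" "") <;>
    simp [pvGoodB] at h1 h2 h3 h4 <;>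
    simp [pvBuild, pvSplit, pvAppendStat, h1, h2, h3, h4]
  · rw [if_neg hg, List.append_nil]
    simp only [pvStepA]
    rw [if_neg hg]

theorem fold_build (annotations : List (List (String × String))) :
    annotations.foldl pvStepA pvInitStats = pvBuild (pvRows annotations) := by
  induction annotations using List.reverseRecOn with
  | nil => rfl
  | append_singleton as a ih =>
      rw [List.foldl_append, List.foldl_cons, List.foldl_nil, ih, pvStepA_build]
      congr 1
      simp [pvRows]

-- ===== VERDICT (by name: the statement is the Claim_ definition above) =====
theorem analyze_quality_combinations_spec : Claim_equal_analyze_quality_combinations := by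
  intro annotations _
  unfold Spec_analyze_quality_combinations analyze_quality_combinations
    analyze_quality_combinations_alt
  exact fold_build annotations
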